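-- pv_equiv track=rewrite | github.com/firstofthekind/smart-changelog | smart_changelog/updater.py | _strip_non_entry_lines
-- ===== SOURCE A (Python) =====
-- from typing import Any, Dict, List, Optional, Set, Tuple
--
-- def _strip_non_entry_lines(lines: List[str]) -> List[str]:
--     """Trim blank lines and remove heading remnants from a section."""
--     trimmed = list(lines)
--     while trimmed and not trimmed[0].strip():
--         trimmed.pop(0)
--     if trimmed and trimmed[0].lstrip().startswith("###"):
--         trimmed.pop(0)
--     while trimmed and not trimmed[0].strip():
--         trimmed.pop(0)
--     while trimmed and not trimmed[-1].strip():
--         trimmed.pop()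
--     return [line.rstrip() for line in trimmed if line.strip()]
-- ===== SOURCE B (Python) =====
-- from typing import List
--
--
-- def _strip_non_entry_lines(lines: List[str]) -> List[str]:
--     """Trim blank lines and remove heading remnants from a section."""
--     entries = [line.rstrip() for line in lines if line.strip()]
--     if entries and entries[0].lstrip().startswith("###"):
--         return entries[1:]
--     return entries
-- ===== Notes on version B (the rewrite author's own statement) =====
-- stated objective: simpler
-- what changed: The four edge-trimming while-loops are removed entirely: B builds the blank-free rstripped list in one filtering pass and then drops at most one leading '###' heading, since the final comprehension in A already discards every blank line.
import Mathlib
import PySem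

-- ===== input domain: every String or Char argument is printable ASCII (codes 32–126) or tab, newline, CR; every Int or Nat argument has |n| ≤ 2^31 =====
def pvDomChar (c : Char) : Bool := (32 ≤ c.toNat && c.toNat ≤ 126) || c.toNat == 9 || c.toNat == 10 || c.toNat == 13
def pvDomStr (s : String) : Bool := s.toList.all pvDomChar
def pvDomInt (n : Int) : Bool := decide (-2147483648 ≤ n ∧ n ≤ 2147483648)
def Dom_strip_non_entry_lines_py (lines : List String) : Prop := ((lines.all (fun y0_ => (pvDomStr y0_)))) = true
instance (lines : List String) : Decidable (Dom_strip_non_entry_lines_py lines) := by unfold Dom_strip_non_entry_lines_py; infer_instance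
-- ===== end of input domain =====

-- B removes A's four edge-trimming while-loops: one filter+rstrip pass, then drop at most one '###' heading.


-- ===== PORT A =====
-- 'while trimmed and not trimmed[0].strip(): trimmed.pop(0)'
def pvPopLeading : List String → List String
  | [] => []
  | x :: xs => if PySem.Str.strip x == "" then pvPopLeading xs else x :: xs

-- 'if trimmed and trimmed[0].lstrip().startswith("###"): trimmed.pop(0)'
def pvDropHeading : List String → List String
  | [] => []
  | x :: xs => if PySem.Str.startswith (PySem.Str.lstrip x) "###" then xs else x :: xs

-- 'while trimmed and not trimmed[-1].strip(): trimmed.pop()' (structural recursion from the left)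
def pvPopTrailing : List String → List String
  | [] => []
  | x :: xs =>
      match pvPopTrailing xs with
      | [] => if PySem.Str.strip x == "" then [] else [x]
      | y :: ys => x :: y :: ys

def strip_non_entry_lines_py (lines : List String) : List String :=
  ((pvPopTrailing (pvPopLeading (pvDropHeading (pvPopLeading lines)))).filter
    (fun l => !(PySem.Str.strip l == ""))).map (fun l => PySem.Str.rstrip l)

-- ===== PORT B =====
def strip_non_entry_lines_py_alt (lines : List String) : List String :=
  match (lines.filter (fun l => !(PySem.Str.strip l == ""))).map (fun l => PySem.Str.rstrip l) with
  | e :: rest => if PySem.Str.startswith (PySem.Str.lstrip e) "###" then rest else e :: rest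
  | [] => []

-- ===== PRECONDITION & SPEC =====
def Spec_strip_non_entry_lines_py (lines : List String) (out : List String) : Prop := out = strip_non_entry_lines_py_alt lines
instance (lines : List String) (out : List String) : Decidable (Spec_strip_non_entry_lines_py lines out) := by unfold Spec_strip_non_entry_lines_py; infer_instance

-- ===== CLAIM (what is proved, stated in full; the proofs are below) =====
def Claim_equal_strip_non_entry_lines_py : Prop := ∀ (lines : List String), Dom_strip_non_entry_lines_py lines → Spec_strip_non_entry_lines_py lines (strip_non_entry_lines_py lines)

-- ===== LEMMAS AND PROOFS =====

-- the common 'keep non-blank lines, rstripped' pass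
def pvF (xs : List String) : List String :=
  (xs.filter (fun l => !(PySem.Str.strip l == ""))).map (fun l => PySem.Str.rstrip l)

theorem pvF_cons (a : String) (l : List String) :
    pvF (a :: l) = if (PySem.Str.strip a == "") = true then pvF l else PySem.Str.rstrip a :: pvF l := by
  by_cases h : (PySem.Str.strip a == "") = true
  · rw [if_pos h]; simp [pvF, h]
  · rw [if_neg h]; simp [pvF, h]

theorem pvF_popLeading (xs : List String) : pvF (pvPopLeading xs) = pvF xs := by
  induction xs with
  | nil => rfl
  | cons x xs ih =>
      simp only [pvPopLeading]
      by_cases h : (PySem.Str.strip x == "") = true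
      · rw [if_pos h, ih, pvF_cons, if_pos h]
      · rw [if_neg h]

theorem pvF_popTrailing (xs : List String) : pvF (pvPopTrailing xs) = pvF xs := by
  induction xs with
  | nil => rfl
  | cons x xs ih =>
      simp only [pvPopTrailing]
      cases hr : pvPopTrailing xs with
      | nil =>
          have h0 : pvF xs = [] := by rw [← ih, hr]; rfl
          by_cases h : (PySem.Str.strip x == "") = true
          · rw [if_pos h, pvF_cons, if_pos h, h0]; rfl
          · rw [if_neg h, pvF_cons, if_neg h, pvF_cons, if_neg h, h0]; rfl
      | cons y ys =>
          have h0 : pvF (y :: ys) = pvF xs := by rw [← hr, ih]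
          rw [pvF_cons x (y :: ys), pvF_cons x xs, h0]

theorem pvPopLeading_shape (xs : List String) :
    pvPopLeading xs = [] ∨ ∃ h t, pvPopLeading xs = h :: t ∧ (PySem.Str.strip h == "") = false := by
  induction xs with
  | nil => exact Or.inl rfl
  | cons x xs ih =>
      simp only [pvPopLeading]
      by_cases h : (PySem.Str.strip x == "") = true
      · simpa [h] using ih
      · exact Or.inr ⟨x, xs, by simp [h], by simpa using h⟩

-- ss all non-space, w all space ⇒ prefixes of d ++ w drawn from ss are already prefixes of d
theorem pvPrefix_append_space (d : List Char) :
    ∀ (ss w : List Char), (∀ c ∈ ss, PySem.Chars.isspace c = false) →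
      (∀ c ∈ w, PySem.Chars.isspace c = true) →
      (ss <+: d ++ w ↔ ss <+: d) := by
  induction d with
  | nil =>
      intro ss w hss hw
      cases ss with
      | nil => simp
      | cons c cs =>
          simp only [List.nil_append]
          constructor
          · intro hp
            cases w with
            | nil => exact hp
            | cons a ws =>
                rw [List.cons_prefix_cons] at hp
                obtain ⟨hc, -⟩ := hp
                have hns := hss c (by simp)
                rw [hc, hw a (by simp)] at hns
                exact absurd hns (by simp)
          · intro hp
            exact absurd hp (by simp)
  | cons x d' ih =>
      intro ss w hss hw
      cases ss with
      | nil => simp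
      | cons c cs =>
          simp only [List.cons_append, List.cons_prefix_cons]
          constructor
          · rintro ⟨h1, h2⟩
            exact ⟨h1, (ih cs w (fun c hc => hss c (by simp [hc])) hw).mp h2⟩
          · rintro ⟨h1, h2⟩
            exact ⟨h1, (ih cs w (fun c hc => hss c (by simp [hc])) hw).mpr h2⟩

-- rstrip splits off an all-whitespace suffix
theorem pvRstrip_decomp (cs : List Char) :
    ∃ w, cs = PySem.Chars.rstrip cs ++ w ∧ ∀ c ∈ w, PySem.Chars.isspace c = true := by
  refine ⟨(cs.reverse.takeWhile PySem.Chars.isspace).reverse, ?_, ?_⟩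
  · calc cs = cs.reverse.reverse := (cs.reverse_reverse).symm
      _ = (cs.reverse.takeWhile PySem.Chars.isspace ++ cs.reverse.dropWhile PySem.Chars.isspace).reverse := by
            rw [List.takeWhile_append_dropWhile]
      _ = PySem.Chars.rstrip cs ++ (cs.reverse.takeWhile PySem.Chars.isspace).reverse := by
            rw [List.reverse_append]; rfl
  · intro c hc
    rw [List.mem_reverse] at hc
    exact List.mem_takeWhile_imp hc

-- rstrip does not disturb a leading '###' after lstrip
theorem pvHeading_rstrip (cs : List Char) :
    PySem.Chars.startswith (PySem.Chars.lstrip (PySem.Chars.rstrip cs)) ['#','#','#'] =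
    PySem.Chars.startswith (PySem.Chars.lstrip cs) ['#','#','#'] := by
  obtain ⟨w, hdec, hw⟩ := pvRstrip_decomp cs
  set r := PySem.Chars.rstrip cs with hr
  have hlcs : PySem.Chars.lstrip cs = if (r.dropWhile PySem.Chars.isspace).isEmpty
      then w.dropWhile PySem.Chars.isspace else r.dropWhile PySem.Chars.isspace ++ w := by
    rw [hdec]
    simp [PySem.Chars.lstrip, List.dropWhile_append]
  by_cases he : (r.dropWhile PySem.Chars.isspace) = []
  · have hwnil : w.dropWhile PySem.Chars.isspace = [] := by
      rw [List.dropWhile_eq_nil_iff]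
      intro c hc; simpa using hw c hc
    rw [hlcs]
    simp [PySem.Chars.lstrip, he, hwnil, PySem.Chars.startswith]
  · rw [hlcs]
    rw [if_neg (by simpa [List.isEmpty_iff] using he)]
    simp only [PySem.Chars.lstrip, PySem.Chars.startswith]
    have hiff := pvPrefix_append_space (r.dropWhile PySem.Chars.isspace) ['#','#','#'] w
      (by intro c hc; fin_cases hc <;> rfl) hw
    rw [Bool.eq_iff_iff]
    simp only [List.isPrefixOf_iff_prefix]
    exact hiff.symm

theorem pvHeading_rstrip_str (h : String) :
    PySem.Str.startswith (PySem.Str.lstrip (PySem.Str.rstrip h)) "###" =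
    PySem.Str.startswith (PySem.Str.lstrip h) "###" := by
  have := pvHeading_rstrip h.toList
  simpa using this

-- ===== VERDICT (by name: the statement is the Claim_ definition above) =====
theorem strip_non_entry_lines_py_spec : Claim_equal_strip_non_entry_lines_py := by
  intro lines _
  unfold Spec_strip_non_entry_lines_py strip_non_entry_lines_py strip_non_entry_lines_py_alt
  rw [show ((pvPopTrailing (pvPopLeading (pvDropHeading (pvPopLeading lines)))).filter
      (fun l => !(PySem.Str.strip l == ""))).map (fun l => PySem.Str.rstrip l)
      = pvF (pvPopTrailing (pvPopLeading (pvDropHeading (pvPopLeading lines)))) from rfl]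
  rw [show (lines.filter (fun l => !(PySem.Str.strip l == ""))).map (fun l => PySem.Str.rstrip l)
      = pvF lines from rfl]
  rw [pvF_popTrailing, pvF_popLeading]
  rcases pvPopLeading_shape lines with h1 | ⟨h, t, h1, hnb⟩
  · have hnil : pvF lines = [] := by rw [← pvF_popLeading lines, h1]; rfl
    rw [h1, hnil]
    rfl
  · have hlines : pvF lines = PySem.Str.rstrip h :: pvF t := by
      rw [← pvF_popLeading lines, h1, pvF_cons, if_neg (by simp [hnb])]
    rw [h1, hlines]
    simp only [pvDropHeading]
    rw [pvHeading_rstrip_str h]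
    by_cases hc : PySem.Str.startswith (PySem.Str.lstrip h) "###" = true
    · rw [if_pos hc, if_pos hc]
    · rw [if_neg hc, if_neg hc, pvF_cons, if_neg (by simp [hnb])]
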